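-- pv_equiv track=rewrite | github.com/HishamMerdan/Backward-Searchs-Citation-classification | Src/features.py | has_author_overlap
-- ===== SOURCE A (Python) =====
-- def has_author_overlap(root_author_list, ref_author_list):
--     """Checks for overlap in author names between two lists, considering both full names and initials."""
--
--     # Split names into first name and last name for root authors
--     root_authors = [{'fore_name': name.split()[0], 'surname': name.split()[-1]}
--                     for name in root_author_list if len(name.split()) > 1]
--
--     # Split names into first name and last name for reference authors
--     ref_authors = [{'fore_name': name.split()[0], 'surname': name.split()[-1]}
--                    for name in ref_author_list if len(name.split()) > 1]
--
--     for root_author in root_authors: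
--         for references_author in ref_authors:
--             if (root_author['fore_name'] == references_author['fore_name']
--                 or root_author['fore_name'][0] == references_author['fore_name']) \
--                     and root_author['surname'] == references_author['surname']:
--                 return 1
--     return 0
-- ===== SOURCE B (Python) =====
-- def has_author_overlap(root_author_list, ref_author_list):
--     """Checks for overlap in author names between two lists, considering both full names and initials."""
--     root_keys = set()
--     for name in root_author_list:
--         tokens = name.split()
--         if len(tokens) > 1:
--             root_keys.add((tokens[0], tokens[-1]))
--             root_keys.add((tokens[0][0], tokens[-1]))
--     ref_keys = set()
--     for name in ref_author_list:
--         tokens = name.split()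
--         if len(tokens) > 1:
--             ref_keys.add((tokens[0], tokens[-1]))
--     return 1 if root_keys & ref_keys else 0
-- ===== Notes on version B (the rewrite author's own statement) =====
-- stated objective: simpler
-- what changed: Replaces the nested pairwise scan over all root/ref author pairs with two key-set constructions (root names contribute both (fore, surname) and (initial, surname) keys) and a single set-intersection test.
import Mathlib
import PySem

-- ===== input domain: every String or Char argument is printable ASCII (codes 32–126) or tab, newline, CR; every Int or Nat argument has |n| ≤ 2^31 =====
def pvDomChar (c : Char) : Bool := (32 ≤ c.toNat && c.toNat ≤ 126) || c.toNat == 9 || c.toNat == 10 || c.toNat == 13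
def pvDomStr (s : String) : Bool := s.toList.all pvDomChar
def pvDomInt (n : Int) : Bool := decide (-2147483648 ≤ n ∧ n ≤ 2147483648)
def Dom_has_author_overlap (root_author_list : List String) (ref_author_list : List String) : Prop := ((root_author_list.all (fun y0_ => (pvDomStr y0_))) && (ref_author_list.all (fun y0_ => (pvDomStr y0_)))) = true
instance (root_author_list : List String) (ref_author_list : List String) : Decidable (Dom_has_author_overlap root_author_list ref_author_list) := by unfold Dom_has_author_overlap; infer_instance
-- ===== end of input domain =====

-- B replaces A's nested pairwise scan with two key-set constructions and one set-intersection test (objective: simpler).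

-- ===== PORT A =====
-- [{'fore_name': name.split()[0], 'surname': name.split()[-1]} for name in l if len(name.split()) > 1]
def pvPairsA (l : List String) : List (String × String) :=
  (l.filter (fun n => 1 < (PySem.Str.split₀ n).length)).map
    (fun n => ((PySem.Str.split₀ n).headD "", (PySem.Str.split₀ n).getLastD ""))

-- the if-condition of A's inner loop; fore_name[0] is the one-character string take 1 (fore_name is nonempty)
def pvCondA (r p : String × String) : Bool :=
  (r.1 == p.1 || String.ofList (r.1.toList.take 1) == p.1) && r.2 == p.2

-- inner 'for references_author in ref_authors' with early return
def pvLoopRef (r : String × String) : List (String × String) → Bool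
  | [] => false
  | p :: ps => if pvCondA r p then true else pvLoopRef r ps

-- outer 'for root_author in root_authors' with early return 1, final return 0
def pvLoopRoot : List (String × String) → List (String × String) → Int
  | [], _ => 0
  | r :: rs, refs => if pvLoopRef r refs then 1 else pvLoopRoot rs refs

def has_author_overlap (root_author_list : List String) (ref_author_list : List String) : Int :=
  pvLoopRoot (pvPairsA root_author_list) (pvPairsA ref_author_list)

-- ===== PORT B =====
-- root_keys.add((tokens[0], tokens[-1])); root_keys.add((tokens[0][0], tokens[-1]))
def pvRootStep (s : PySem.Set (String × String)) (n : String) : PySem.Set (String × String) :=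
  let t := PySem.Str.split₀ n
  if 1 < t.length then
    let f := t.headD ""
    let sur := t.getLastD ""
    PySem.Set.add (PySem.Set.add s (f, sur)) (String.ofList (f.toList.take 1), sur)
  else s

-- ref_keys.add((tokens[0], tokens[-1]))
def pvRefStep (s : PySem.Set (String × String)) (n : String) : PySem.Set (String × String) :=
  let t := PySem.Str.split₀ n
  if 1 < t.length then PySem.Set.add s (t.headD "", t.getLastD "") else s

def has_author_overlap_alt (root_author_list : List String) (ref_author_list : List String) : Int :=
  let rootKeys := root_author_list.foldl pvRootStep PySem.Set.empty
  let refKeys := ref_author_list.foldl pvRefStep PySem.Set.empty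
  if (PySem.Set.inter rootKeys refKeys).isEmpty then 0 else 1

-- ===== PRECONDITION & SPEC =====
def Spec_has_author_overlap (root_author_list : List String) (ref_author_list : List String) (out : Int) : Prop := out = has_author_overlap_alt root_author_list ref_author_list
instance (root_author_list : List String) (ref_author_list : List String) (out : Int) : Decidable (Spec_has_author_overlap root_author_list ref_author_list out) := by unfold Spec_has_author_overlap; infer_instance

-- ===== CLAIM (what is proved, stated in full; the proofs are below) =====
def Claim_equal_has_author_overlap : Prop := ∀ (root_author_list : List String) (ref_author_list : List String), Dom_has_author_overlap root_author_list ref_author_list → Spec_has_author_overlap root_author_list ref_author_list (has_author_overlap root_author_list ref_author_list)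

-- ===== LEMMAS AND PROOFS =====

def pvKey1 (n : String) : String × String :=
  ((PySem.Str.split₀ n).headD "", (PySem.Str.split₀ n).getLastD "")

def pvKey2 (n : String) : String × String :=
  (String.ofList (((PySem.Str.split₀ n).headD "").toList.take 1), (PySem.Str.split₀ n).getLastD "")

def pvRootKeys (n : String) : List (String × String) :=
  if 1 < (PySem.Str.split₀ n).length then [pvKey1 n, pvKey2 n] else []

def pvRefKeys (n : String) : List (String × String) :=
  if 1 < (PySem.Str.split₀ n).length then [pvKey1 n] else []

lemma rootStep_eq (s : PySem.Set (String × String)) (n : String) :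
    pvRootStep s n = (pvRootKeys n).foldl PySem.Set.add s := by
  unfold pvRootStep pvRootKeys pvKey1 pvKey2
  split_ifs with h <;> simp [h, List.foldl]

lemma refStep_eq (s : PySem.Set (String × String)) (n : String) :
    pvRefStep s n = (pvRefKeys n).foldl PySem.Set.add s := by
  unfold pvRefStep pvRefKeys pvKey1
  split_ifs with h <;> simp [h, List.foldl]

lemma mem_foldl_add (xs : List (String × String)) (s : PySem.Set (String × String)) (k : String × String) :
    k ∈ xs.foldl PySem.Set.add s ↔ k ∈ s ∨ k ∈ xs := by
  induction xs generalizing s with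
  | nil => simp
  | cons x xs ih => simp [ih, PySem.Set.mem_add]; tauto

lemma mem_foldl_kstep (f : String → List (String × String)) (l : List String)
    (s : PySem.Set (String × String)) (k : String × String) :
    k ∈ l.foldl (fun s n => (f n).foldl PySem.Set.add s) s ↔ k ∈ s ∨ ∃ n ∈ l, k ∈ f n := by
  induction l generalizing s with
  | nil => simp
  | cons n ns ih => simp [ih, mem_foldl_add]; tauto

lemma mem_foldl_rootStep (l : List String) (k : String × String) :
    k ∈ l.foldl pvRootStep PySem.Set.empty ↔ ∃ n ∈ l, k ∈ pvRootKeys n := by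
  rw [show pvRootStep = fun s n => (pvRootKeys n).foldl PySem.Set.add s from
    funext fun s => funext fun n => rootStep_eq s n]
  rw [mem_foldl_kstep]
  simp [PySem.Set.empty]

lemma mem_foldl_refStep (l : List String) (k : String × String) :
    k ∈ l.foldl pvRefStep PySem.Set.empty ↔ ∃ n ∈ l, k ∈ pvRefKeys n := by
  rw [show pvRefStep = fun s n => (pvRefKeys n).foldl PySem.Set.add s from
    funext fun s => funext fun n => refStep_eq s n]
  rw [mem_foldl_kstep]
  simp [PySem.Set.empty]

lemma mem_pvPairsA (l : List String) (r : String × String) :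
    r ∈ pvPairsA l ↔ ∃ n ∈ l, 1 < (PySem.Str.split₀ n).length ∧ r = pvKey1 n := by
  simp only [pvPairsA, List.mem_map, List.mem_filter]
  constructor
  · rintro ⟨n, ⟨hn, hp⟩, rfl⟩
    exact ⟨n, hn, by simpa using hp, rfl⟩
  · rintro ⟨n, hn, hp, rfl⟩
    exact ⟨n, ⟨hn, by simpa using hp⟩, rfl⟩

lemma pvLoopRef_eq_true (r : String × String) (l : List (String × String)) :
    pvLoopRef r l = true ↔ ∃ p ∈ l, pvCondA r p = true := by
  induction l with
  | nil => simp [pvLoopRef]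
  | cons p ps ih =>
    simp only [pvLoopRef]
    by_cases h : pvCondA r p = true <;> simp [h, ih]

lemma pvLoopRoot_eq (rs refs : List (String × String)) :
    pvLoopRoot rs refs = if (∃ r ∈ rs, ∃ p ∈ refs, pvCondA r p = true) then 1 else 0 := by
  induction rs with
  | nil => simp [pvLoopRoot]
  | cons r rs ih =>
    simp only [pvLoopRoot]
    by_cases h : pvLoopRef r refs = true
    · rw [if_pos h, if_pos ⟨r, List.mem_cons_self .., (pvLoopRef_eq_true _ _).mp h⟩]
    · have hn : ¬ ∃ p ∈ refs, pvCondA r p = true := fun hc => h ((pvLoopRef_eq_true _ _).mpr hc)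
      have hiff : (∃ r' ∈ r :: rs, ∃ p ∈ refs, pvCondA r' p = true) ↔
          (∃ r' ∈ rs, ∃ p ∈ refs, pvCondA r' p = true) := by
        simp only [List.mem_cons]
        constructor
        · rintro ⟨r', (rfl | hr'), hp⟩
          · exact absurd hp hn
          · exact ⟨r', hr', hp⟩
        · rintro ⟨r', hr', hp⟩
          exact ⟨r', Or.inr hr', hp⟩
      rw [eq_false_of_ne_true h, if_neg (by simp), ih, if_congr hiff.symm rfl rfl]

lemma condA_iff (n m : String) :
    pvCondA (pvKey1 n) (pvKey1 m) = true ↔ pvKey1 m = pvKey1 n ∨ pvKey1 m = pvKey2 n := by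
  simp only [pvCondA, pvKey1, pvKey2, Bool.and_eq_true, Bool.or_eq_true, beq_iff_eq, Prod.mk.injEq]
  constructor
  · rintro ⟨h1 | h1, h2⟩
    · exact Or.inl ⟨h1.symm, h2.symm⟩
    · exact Or.inr ⟨h1.symm, h2.symm⟩
  · rintro (⟨h1, h2⟩ | ⟨h1, h2⟩)
    · exact ⟨Or.inl h1.symm, h2.symm⟩
    · exact ⟨Or.inr h1.symm, h2.symm⟩

lemma mem_rootKeys_iff (n : String) (k : String × String) :
    k ∈ pvRootKeys n ↔ 1 < (PySem.Str.split₀ n).length ∧ (k = pvKey1 n ∨ k = pvKey2 n) := by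
  unfold pvRootKeys; split_ifs with h <;> simp [h]

lemma mem_refKeys_iff (n : String) (k : String × String) :
    k ∈ pvRefKeys n ↔ 1 < (PySem.Str.split₀ n).length ∧ k = pvKey1 n := by
  unfold pvRefKeys; split_ifs with h <;> simp [h]

-- ===== VERDICT (by name: the statement is the Claim_ definition above) =====
theorem has_author_overlap_spec : Claim_equal_has_author_overlap := by
  intro root ref _
  unfold Spec_has_author_overlap has_author_overlap has_author_overlap_alt
  rw [pvLoopRoot_eq]
  have hiff : (∃ r ∈ pvPairsA root, ∃ p ∈ pvPairsA ref, pvCondA r p = true) ↔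
      ¬ (PySem.Set.inter (root.foldl pvRootStep PySem.Set.empty) (ref.foldl pvRefStep PySem.Set.empty)).isEmpty = true := by
    rw [List.isEmpty_iff]
    constructor
    · rintro ⟨r, hr, p, hp, hc⟩
      rw [mem_pvPairsA] at hr hp
      obtain ⟨n, hn, hokn, rfl⟩ := hr
      obtain ⟨m, hm, hokm, rfl⟩ := hp
      rw [condA_iff] at hc
      intro hnil
      have hmem : pvKey1 m ∈ PySem.Set.inter (root.foldl pvRootStep PySem.Set.empty)
          (ref.foldl pvRefStep PySem.Set.empty) := by
        rw [PySem.Set.mem_inter]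
        exact ⟨(mem_foldl_rootStep _ _).mpr ⟨n, hn, (mem_rootKeys_iff _ _).mpr ⟨hokn, hc⟩⟩,
               (mem_foldl_refStep _ _).mpr ⟨m, hm, (mem_refKeys_iff _ _).mpr ⟨hokm, rfl⟩⟩⟩
      rw [hnil] at hmem
      exact absurd hmem (List.not_mem_nil)
    · intro hne
      rcases List.exists_mem_of_ne_nil _ (fun h => hne h) with ⟨k, hk⟩
      rw [PySem.Set.mem_inter, mem_foldl_rootStep, mem_foldl_refStep] at hk
      obtain ⟨⟨n, hn, hkn⟩, ⟨m, hm, hkm⟩⟩ := hk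
      rw [mem_rootKeys_iff] at hkn
      rw [mem_refKeys_iff] at hkm
      refine ⟨pvKey1 n, (mem_pvPairsA _ _).mpr ⟨n, hn, hkn.1, rfl⟩,
              pvKey1 m, (mem_pvPairsA _ _).mpr ⟨m, hm, hkm.1, rfl⟩, ?_⟩
      rw [condA_iff, ← hkm.2]
      exact hkn.2
  by_cases h : (∃ r ∈ pvPairsA root, ∃ p ∈ pvPairsA ref, pvCondA r p = true)
  · rw [if_pos h, if_neg (by simpa using hiff.mp h)]
  · rw [if_neg h, if_pos (by by_contra hc; exact h (hiff.mpr hc))]
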